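-- pv_equiv track=rewrite | github.com/MrBrasilMan/iMuffin | parser.py | link_list
-- ===== SOURCE A (Python) =====
-- def link_list(possiblelinkbody):
--   #This was a very complex function to write, and even I do not fully understand how it works. But it does (somewhat) and I am here to document it.
--   #First, get a list of functions
--   allchar = list(possiblelinkbody)
--   #Create a list to add all text to.
--   text_list = []
--   #PPossible href is True when < appears, possibly conveying that <> contains a link
--   possible_href = False
--   #Where it is followed by an a, which leads it to assume it to be a link. It could not be, but 9/10 times, this will display a link.
--   is_href = False
--   #For all charecters in the body
--   for char in allchar:
--     #If the letter is a(processes before removing possible href)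
--     if char == "a" and possible_href == True:
--       is_href = True
--     #Only scans one line looking for a, shuts down if it is not on the second one.
--     if possible_href == True:
--       possible_href = False
--     #If the charecter is equal to <, then flag it as a possible url.
--     if char == "<":
--       possible_href = True
--     #If the line ends, stop.
--     if char == ">" and is_href == True:
--       is_href = False
--     #Otherwise display the link for the person.
--     if is_href == True:
--       text_list.append(char)
--   str1 = ""
--   return str1.join(text_list)
-- ===== SOURCE B (Python) =====
-- def link_list(possiblelinkbody):
--     s = possiblelinkbody
--     n = len(s)
--     parts = []
--     i = 0
--     while i < n:
--         if s[i] == '<' and s[i+1:i+2] == 'a':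
--             j = i + 1
--             while j < n and s[j] != '>':
--                 j += 1
--             parts.append(s[i+1:j])
--             i = j + 1
--         else:
--             i += 1
--     return ''.join(parts)
-- ===== Notes on version B (the rewrite author's own statement) =====
-- stated objective: simpler
-- what changed: Replaced A's per-character two-boolean-flag state machine with a direct scan that jumps to each anchor-start marker and slices out the whole run up to its terminator in one step.
import Mathlib
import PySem

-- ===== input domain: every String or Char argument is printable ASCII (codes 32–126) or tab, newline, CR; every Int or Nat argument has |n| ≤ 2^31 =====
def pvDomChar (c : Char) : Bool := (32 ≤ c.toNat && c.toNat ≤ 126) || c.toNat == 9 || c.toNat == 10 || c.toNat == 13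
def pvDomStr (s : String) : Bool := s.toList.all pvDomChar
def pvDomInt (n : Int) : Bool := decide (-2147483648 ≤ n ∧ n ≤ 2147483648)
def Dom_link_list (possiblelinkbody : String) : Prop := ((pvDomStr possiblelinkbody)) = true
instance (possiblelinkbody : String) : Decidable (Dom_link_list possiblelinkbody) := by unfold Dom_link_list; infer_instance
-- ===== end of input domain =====

-- B replaces A's per-character two-flag state machine by jumping to each anchor start
-- and slicing the run up to its end in one step (simpler; no mutation involved).

-- ===== PORT A =====
-- one iteration of A's for-loop: state (possible_href, is_href, text_list)
def pvStepA (st : Bool × Bool × List Char) (c : Char) : Bool × Bool × List Char :=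
  let ih := if c = 'a' ∧ st.1 = true then true else st.2.1
  let ph := if st.1 = true then false else st.1
  let ph := if c = '<' then true else ph
  let ih := if c = '>' ∧ ih = true then false else ih
  let acc := if ih = true then st.2.2 ++ [c] else st.2.2
  (ph, ih, acc)

def link_list (possiblelinkbody : String) : String :=
  String.mk ((possiblelinkbody.toList.foldl pvStepA (false, false, [])).2.2)

-- ===== PORT B =====
-- B's outer while-loop: at "<a", take the run up to the next '>', skip past it, continue
def pvGoB : List Char → List Char
  | [] => []
  | c :: rest =>
    if c = '<' ∧ rest.head? = some 'a' then
      rest.takeWhile (· ≠ '>') ++ pvGoB ((rest.dropWhile (· ≠ '>')).drop 1)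
    else
      pvGoB rest
termination_by l => l.length
decreasing_by
  · have h1 := List.length_dropWhile_le (p := (· ≠ '>')) (l := rest)
    simp only [List.length_cons, List.length_drop]
    omega
  · simp

def link_list_alt (possiblelinkbody : String) : String :=
  String.mk (pvGoB possiblelinkbody.toList)

-- ===== PRECONDITION & SPEC =====
def Spec_link_list (possiblelinkbody : String) (out : String) : Prop := out = link_list_alt possiblelinkbody
instance (possiblelinkbody : String) (out : String) : Decidable (Spec_link_list possiblelinkbody out) := by unfold Spec_link_list; infer_instance

-- ===== CLAIM (what is proved, stated in full; the proofs are below) =====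
def Claim_equal_link_list : Prop := ∀ (possiblelinkbody : String), Dom_link_list possiblelinkbody → Spec_link_list possiblelinkbody (link_list possiblelinkbody)

-- ===== LEMMAS AND PROOFS =====

-- what A computes from the state "previous char was '<'": if an 'a' follows, emit the run
def pvQ (l : List Char) : List Char :=
  if l.head? = some 'a' then
    l.takeWhile (· ≠ '>') ++ pvGoB ((l.dropWhile (· ≠ '>')).drop 1)
  else pvGoB l

-- what A computes from the state "is_href = true": emit up to the next '>', then resume
def pvR (l : List Char) : List Char :=
  l.takeWhile (· ≠ '>') ++ pvGoB ((l.dropWhile (· ≠ '>')).drop 1)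

theorem pvStepA_idle (acc : List Char) (c : Char) :
    pvStepA (false, false, acc) c = (decide (c = '<'), false, acc) := by
  simp [pvStepA]

theorem pvStepA_after_lt (acc : List Char) (c : Char) :
    pvStepA (true, false, acc) c =
      (decide (c = '<'), decide (c = 'a'), if c = 'a' then acc ++ [c] else acc) := by
  by_cases ha : c = 'a'
  · subst ha; simp [pvStepA]
  · simp [pvStepA, ha]

theorem pvStepA_run (ph : Bool) (acc : List Char) (c : Char) :
    pvStepA (ph, true, acc) c =
      (decide (c = '<'), !decide (c = '>'), if c = '>' then acc else acc ++ [c]) := by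
  by_cases hg : c = '>' <;> cases ph <;> simp [pvStepA, hg]

theorem pvFoldA_states (l : List Char) : ∀ (acc : List Char),
    (l.foldl pvStepA (false, false, acc)).2.2 = acc ++ pvGoB l ∧
    (l.foldl pvStepA (true, false, acc)).2.2 = acc ++ pvQ l ∧
    ∀ ph, (l.foldl pvStepA (ph, true, acc)).2.2 = acc ++ pvR l := by
  induction l with
  | nil =>
    intro acc
    refine ⟨by simp [pvGoB], by simp [pvQ, pvGoB], fun ph => by simp [pvR, pvGoB]⟩
  | cons c rest ih =>
    intro acc
    refine ⟨?_, ?_, ?_⟩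
    · -- idle state
      rw [List.foldl_cons, pvStepA_idle]
      by_cases hc : c = '<'
      · subst hc
        norm_num
        rw [(ih acc).2.1, pvGoB]
        simp only [pvQ]
        split <;> simp_all
      · simp only [hc, decide_false]
        rw [(ih acc).1, pvGoB]
        simp [hc]
    · -- state: previous char was '<'
      rw [List.foldl_cons, pvStepA_after_lt]
      by_cases ha : c = 'a'
      · subst ha
        by_cases hc : ('a':Char) = '<'
        · exact absurd hc (by decide)
        simp only [hc, decide_false]
        norm_num
        rw [(ih (acc ++ ['a'])).2.2 false]
        simp [pvQ, pvR, List.takeWhile, List.dropWhile]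
      · simp only [ha, decide_false, if_false]
        by_cases hc : c = '<'
        · subst hc
          norm_num
          rw [(ih acc).2.1]
          simp [pvQ, ha, pvGoB]
        · simp only [hc, decide_false]
          rw [(ih acc).1]
          simp only [pvQ]
          rw [if_neg (by simp [ha]), pvGoB]
          simp [hc]
    · -- state: is_href = true (inside a run)
      intro ph
      rw [List.foldl_cons, pvStepA_run ph]
      by_cases hg : c = '>'
      · subst hg
        by_cases hc : ('>':Char) = '<'
        · exact absurd hc (by decide)
        simp only [hc, decide_false]
        norm_num
        rw [(ih acc).1]
        simp [pvR, List.takeWhile, List.dropWhile]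
      · simp only [hg, decide_false, Bool.not_false, if_false]
        rw [(ih (acc ++ [c])).2.2]
        simp [pvR, List.takeWhile, List.dropWhile, hg]

-- ===== VERDICT (by name: the statement is the Claim_ definition above) =====
theorem link_list_spec : Claim_equal_link_list := by
  intro s _
  unfold Spec_link_list link_list link_list_alt
  rw [(pvFoldA_states s.toList []).1]
  simp
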